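-- pv_equiv track=rewrite | github.com/Yawn-Sean/Daily_CF_Problems | daily_problems/2025/12/1229/personal_submission/cf104786c_liryc.py | solve
-- ===== SOURCE A (Python) =====
-- def solve(n: int, x: int, y: int) -> int:
--     MOD = 1000000007
--
--     x = n - x
--     y = n - y
--
--     dp = [[0] * (x + 1) for _ in range(x + 1)]
--
--     r2 = MOD + 1 >> 1
--
--     for i in range(1, x + 1):
--         for j in range(i):
--             v = dp[i - 1][abs(j - 1)]
--             if j + 1 <= i - 1:
--                 v += dp[i - 1][j + 1]
--             dp[i][j] = (v * r2 + 1) % MOD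
--
--     return dp[x][y]
-- ===== SOURCE B (Python) =====
-- def solve(n: int, x: int, y: int) -> int:
--     # Demand-driven sparse DP: pass 1 collects, top-down, the set of cells each
--     # level must provide for the queried cell; pass 2 evaluates only those cells
--     # bottom-up in per-level dicts (no full 2-D table).
--     MOD = 1000000007
--     inv2 = (MOD + 1) // 2
--     X = n - x
--     Y = n - y
--     # pass 1: needed cells per level (dict used as an ordered set)
--     need = [dict() for _ in range(X + 1)]
--     need[X][Y] = True
--     for i in range(X, 0, -1):
--         for j in need[i]:
--             if 0 <= j < i:
--                 need[i - 1][abs(j - 1)] = True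
--                 if j + 1 <= i - 1:
--                     need[i - 1][j + 1] = True
--     # pass 2: evaluate the needed cells, level by level
--     prev = {}
--     for i in range(0, X + 1):
--         cur = {}
--         for j in need[i]:
--             if i == 0 or j >= i:
--                 cur[j] = 0
--             else:
--                 v = prev[abs(j - 1)]
--                 if j + 1 <= i - 1:
--                     v += prev[j + 1]
--                 cur[j] = (v * inv2 + 1) % MOD
--         prev = cur
--     return prev[Y]
-- ===== Notes on version B (the rewrite author's own statement) =====
-- stated objective: alternative
-- what changed: Replaces the bottom-up fill of the full (x+1)x(x+1) table with demand-driven sparse evaluation: a top-down pass collects, per level, the set of cells the queried cell transitively needs, then a bottom-up pass evaluates only those cells in per-level dicts.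
-- outside the precondition, e.g. on solve(3, 0, 5): A returns 750000007, B raises KeyError; on solve(1, 1, 2): A returns 0, B returns 0
import Mathlib
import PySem

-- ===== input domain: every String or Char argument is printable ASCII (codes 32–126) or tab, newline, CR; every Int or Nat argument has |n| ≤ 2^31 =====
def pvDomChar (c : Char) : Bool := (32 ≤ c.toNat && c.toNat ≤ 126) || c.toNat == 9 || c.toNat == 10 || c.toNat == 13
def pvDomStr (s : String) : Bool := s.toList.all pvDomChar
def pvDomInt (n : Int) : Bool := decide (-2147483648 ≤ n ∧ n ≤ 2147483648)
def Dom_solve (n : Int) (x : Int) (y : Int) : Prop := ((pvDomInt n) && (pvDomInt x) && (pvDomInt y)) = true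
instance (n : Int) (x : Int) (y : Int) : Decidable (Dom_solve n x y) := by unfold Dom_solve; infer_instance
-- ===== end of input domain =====

-- B replaces the bottom-up fill of the full 2-D DP table with demand-driven sparse
-- evaluation: a top-down pass collects the cells the query needs, a bottom-up pass
-- evaluates only those in per-level dicts (alternative decomposition; same answers on Pre_).

-- ===== PORT A =====
def solve (n : Int) (x : Int) (y : Int) : Int :=
  let MOD : Int := 1000000007
  let x' := n - x
  let y' := n - y
  -- [[0] * (x + 1) for _ in range(x + 1)] : [0]*m is [] for m ≤ 0, so replicate of toNat is exact
  let dp : List (List Int) :=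
    (PySem.List.pyRange 0 (x' + 1) 1).map (fun _ => List.replicate (x' + 1).toNat (0 : Int))
  -- MOD + 1 >> 1 : right shift of the nonnegative MOD+1 by one bit = floor division by 2, exact
  let r2 : Int := PySem.Int.floordiv (MOD + 1) 2
  let dp := (PySem.List.pyRange 1 (x' + 1) 1).foldl (fun dp i =>
    (PySem.List.pyRange 0 i 1).foldl (fun dp j =>
      let v := PySem.List.pyGetD (PySem.List.pyGetD dp (i - 1) []) |j - 1| 0
      let v := if j + 1 ≤ i - 1 then
                 v + PySem.List.pyGetD (PySem.List.pyGetD dp (i - 1) []) (j + 1) 0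
               else v
      PySem.List.pySetD dp i
        (PySem.List.pySetD (PySem.List.pyGetD dp i []) j (PySem.Int.mod (v * r2 + 1) MOD))) dp) dp
  PySem.List.pyGetD (PySem.List.pyGetD dp x' []) y' 0

-- ===== PORT B =====
def solve_alt (n : Int) (x : Int) (y : Int) : Int :=
  let MOD : Int := 1000000007
  let inv2 : Int := PySem.Int.floordiv (MOD + 1) 2
  let X := n - x
  let Y := n - y
  -- pass 1: needed cells per level (a dict used as an ordered set); need[X][Y] = True
  let need : List (PySem.Dict Int Bool) :=
    (PySem.List.pyRange 0 (X + 1) 1).map (fun _ => (PySem.Dict.empty : PySem.Dict Int Bool))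
  let need := PySem.List.pySetD need X
    ((PySem.List.pyGetD need X PySem.Dict.empty).insert Y true)
  let need := (PySem.List.pyRange X 0 (-1)).foldl (fun need i =>
    (PySem.List.pyGetD need i PySem.Dict.empty).items.foldl (fun need kv =>
      if 0 ≤ kv.1 ∧ kv.1 < i then
        let need := PySem.List.pySetD need (i - 1)
          ((PySem.List.pyGetD need (i - 1) PySem.Dict.empty).insert |kv.1 - 1| true)
        if kv.1 + 1 ≤ i - 1 then
          PySem.List.pySetD need (i - 1)
            ((PySem.List.pyGetD need (i - 1) PySem.Dict.empty).insert (kv.1 + 1) true)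
        else need
      else need) need) need
  -- pass 2: evaluate the needed cells, level by level.  prev[abs(j-1)], prev[j+1] and
  -- prev[Y] are lookups of keys present by construction inside Pre_, so getD is exact there.
  let prev : PySem.Dict Int Int := PySem.Dict.empty
  let prev := (PySem.List.pyRange 0 (X + 1) 1).foldl (fun prev i =>
    (PySem.List.pyGetD need i PySem.Dict.empty).items.foldl (fun cur kv =>
      if i = 0 ∨ i ≤ kv.1 then cur.insert kv.1 0
      else
        let v := prev.getD |kv.1 - 1| 0
        let v := if kv.1 + 1 ≤ i - 1 then v + prev.getD (kv.1 + 1) 0 else v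
        cur.insert kv.1 (PySem.Int.mod (v * inv2 + 1) MOD)) PySem.Dict.empty) prev
  prev.getD Y 0

-- ===== PRECONDITION & SPEC =====
-- Pre_ excludes the inputs where A raises IndexError (n-x < 0, or n-y outside the index
-- range of a row) and the inputs with n-y < 0 (i.e. y > n), outside the task's natural
-- domain, where A's value comes from accidental Python negative-index wraparound and B's
-- demand-driven evaluation raises KeyError (except the trivial n-x = 0 row, where both give 0).
def Pre_solve (n : Int) (x : Int) (y : Int) : Prop :=
  0 ≤ n - x ∧ 0 ≤ n - y ∧ n - y ≤ n - x
instance (n : Int) (x : Int) (y : Int) : Decidable (Pre_solve n x y) := by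
  unfold Pre_solve; infer_instance
def pvWitness_solve : Int × Int × Int := (3, 1, 2)

def Spec_solve (n : Int) (x : Int) (y : Int) (out : Int) : Prop := out = solve_alt n x y
instance (n : Int) (x : Int) (y : Int) (out : Int) : Decidable (Spec_solve n x y out) := by
  unfold Spec_solve; infer_instance

-- ===== CLAIM (what is proved, stated in full; the proofs are below) =====
def Claim_equal_solve : Prop := ∀ (n : Int) (x : Int) (y : Int),
  Dom_solve n x y → Pre_solve n x y → Spec_solve n x y (solve n x y)

-- ===== LEMMAS AND PROOFS =====

-- ---------- the mathematical DP table (shared reference point) ----------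

-- the value written into row i at position j, reading the previous row p
def pvRowStep (p : List Int) (i : Nat) (j : Nat) : Int :=
  PySem.Int.mod ((PySem.List.pyGetD p ((((j : Int) - 1).natAbs : Nat) : Int) 0
      + (if j + 2 ≤ i then PySem.List.pyGetD p ((j : Int) + 1) 0 else 0)) * 500000004 + 1)
    1000000007

-- row i of the DP table (full width N+1)
def pvBrow (N : Nat) : Nat → List Int
  | 0 => List.replicate (N + 1) 0
  | i + 1 => (List.range (i + 1)).map (pvRowStep (pvBrow N i) (i + 1)) ++ List.replicate (N - i) 0

-- the single-cell value of the DP, indexed by (level, Int column); cells outside 0 ≤ j < i are 0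
def pvCell : Nat → Int → Int
  | 0, _ => 0
  | i + 1, j =>
    if ((i : Int) + 1) ≤ j then 0
    else PySem.Int.mod ((pvCell i |j - 1|
        + if j + 1 ≤ (i : Int) then pvCell i (j + 1) else 0) * 500000004 + 1) 1000000007

-- ---------- A-side: the nested loops fill pvBrow rows ----------

-- the table after the first k outer iterations: rows 0..k done, the rest still zero
def pvTable (N k : Nat) : List (List Int) :=
  (List.range (N + 1)).map (fun r => if r ≤ k then pvBrow N r else List.replicate (N + 1) 0)

-- A's inner-loop body / outer-loop body / whole loop, as named functions (defeq to the port)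
def pvInner (i : Int) (dp : List (List Int)) (j : Int) : List (List Int) :=
  let v := PySem.List.pyGetD (PySem.List.pyGetD dp (i - 1) []) |j - 1| 0
  let v := if j + 1 ≤ i - 1 then
             v + PySem.List.pyGetD (PySem.List.pyGetD dp (i - 1) []) (j + 1) 0
           else v
  PySem.List.pySetD dp i
    (PySem.List.pySetD (PySem.List.pyGetD dp i []) j
      (PySem.Int.mod (v * PySem.Int.floordiv (1000000007 + 1) 2 + 1) 1000000007))

def pvOuter (dp : List (List Int)) (i : Int) : List (List Int) :=
  (PySem.List.pyRange 0 i 1).foldl (pvInner i) dp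

def pvAfold (X : Int) : List (List Int) :=
  (PySem.List.pyRange 1 (X + 1) 1).foldl pvOuter
    ((PySem.List.pyRange 0 (X + 1) 1).map (fun _ => List.replicate (X + 1).toNat (0 : Int)))

theorem pvHalf : PySem.Int.floordiv (1000000007 + 1) 2 = 500000004 := by
  rw [PySem.Int.floordiv_eq_ediv_of_pos (by norm_num)]; norm_num

theorem pvBrow_length (N i : Nat) (h : i ≤ N) : (pvBrow N i).length = N + 1 := by
  cases i with
  | zero => simp [pvBrow]
  | succ k => simp [pvBrow]; omega

theorem pvTable_length (N k : Nat) : (pvTable N k).length = N + 1 := by simp [pvTable]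

theorem pvTable_zero (N : Nat) :
    ((PySem.List.pyRange 0 ((N : Int) + 1) 1).map (fun _ => List.replicate ((N : Int) + 1).toNat (0 : Int)))
      = pvTable N 0 := by
  have h1 : ((N : Int) + 1) = ((N + 1 : Nat) : Int) := by push_cast; ring
  rw [pvTable, h1, PySem.List.pyRange_zero_natCast, List.map_map]
  apply List.map_congr_left
  intro a ha
  simp only [Function.comp_apply, Int.toNat_natCast]
  rcases Nat.eq_zero_or_pos a with h | h
  · subst h; simp [pvBrow]
  · rw [if_neg (by omega)]

theorem pvTable_succ (N k : Nat) :
    pvTable N (k + 1) = (pvTable N k).set (k + 1) (pvBrow N (k + 1)) := by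
  apply List.ext_getElem
  · simp [pvTable]
  intro i h1 h2
  simp only [pvTable, List.length_map, List.length_range] at h1
  rw [List.getElem_set]
  simp only [pvTable, List.getElem_map, List.getElem_range]
  by_cases hik : k + 1 = i
  · rw [if_pos hik, ← hik, if_pos (le_refl _)]
  · rw [if_neg hik]
    by_cases hle : i ≤ k
    · rw [if_pos hle, if_pos (by omega)]
    · rw [if_neg hle, if_neg (by omega)]

theorem pvInner_eval (N k m : Nat) (hk : k + 1 ≤ N) (L : List Int)
    (hL : L.length = N + 1) :
    pvInner ((k : Int) + 1) ((pvTable N k).set (k + 1) L) (m : Int)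
      = (pvTable N k).set (k + 1) (L.set m (pvRowStep (pvBrow N k) (k + 1) m)) := by
  unfold pvInner
  rw [pvHalf]
  have e1 : ((k : Int) + 1 - 1) = ((k : Nat) : Int) := by ring
  have e2 : ((k : Int) + 1) = ((k + 1 : Nat) : Int) := by push_cast; ring
  rw [e1, e2]
  have hprev : PySem.List.pyGetD ((pvTable N k).set (k + 1) L) ((k : Nat) : Int) []
      = pvBrow N k := by
    rw [PySem.List.pyGetD_natCast, List.getD_eq_getElem _ _ (by rw [List.length_set, pvTable_length]; omega),
      List.getElem_set_ne (by omega)]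
    simp [pvTable]
  have hcur : PySem.List.pyGetD ((pvTable N k).set (k + 1) L) ((k + 1 : Nat) : Int) []
      = L := by
    rw [PySem.List.pyGetD_natCast, List.getD_eq_getElem _ _ (by rw [List.length_set, pvTable_length]; omega),
      List.getElem_set_self (by rw [List.length_set, pvTable_length]; omega)]
  rw [hprev, hcur]
  rw [PySem.List.pySetD_natCast, List.set_set]
  congr 1
  rw [PySem.List.pySetD_natCast]
  congr 1
  rw [pvRowStep]
  have habs : |(m : Int) - 1| = ((((m : Int) - 1).natAbs : Nat) : Int) := Int.abs_eq_natAbs _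
  rw [habs]
  by_cases hg : m + 2 ≤ k + 1
  · rw [if_pos (by omega : (m : Int) + 1 ≤ ((k : Nat) : Int)), if_pos hg]
  · rw [if_neg (by omega : ¬ ((m : Int) + 1 ≤ ((k : Nat) : Int))), if_neg hg]
    simp

theorem pvA_inner (N k : Nat) (hk : k + 1 ≤ N) : ∀ m : Nat, m ≤ k + 1 →
    (PySem.List.pyRange 0 (m : Int) 1).foldl (pvInner ((k : Int) + 1)) (pvTable N k)
      = (pvTable N k).set (k + 1)
          ((List.range m).map (pvRowStep (pvBrow N k) (k + 1)) ++ List.replicate (N + 1 - m) 0) := by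
  intro m
  induction m with
  | zero =>
    intro _
    rw [show ((0 : Nat) : Int) = 0 from rfl, PySem.List.pyRange_one_eq_nil (by omega), List.foldl_nil]
    simp only [List.range_zero, List.map_nil, List.nil_append, Nat.sub_zero]
    apply List.ext_getElem
    · simp [pvTable]
    intro i h1 h2
    simp only [pvTable, List.length_map, List.length_range] at h1
    rw [List.getElem_set]
    by_cases hik : k + 1 = i
    · rw [if_pos hik]
      simp only [pvTable, List.getElem_map, List.getElem_range]
      rw [if_neg (by omega)]
    · rw [if_neg hik]
  | succ m ih =>
    intro hm
    have e : ((m + 1 : Nat) : Int) = ((m : Nat) : Int) + 1 := by push_cast; ring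
    rw [e, PySem.List.pyRange_one_succ_right (by positivity), List.foldl_append,
      List.foldl_cons, List.foldl_nil, ih (by omega)]
    rw [pvInner_eval N k m hk _ (by simp; omega)]
    congr 1
    rw [show N + 1 - m = (N - m) + 1 by omega, List.replicate_succ]
    have hlenmap : ((List.range m).map (pvRowStep (pvBrow N k) (k + 1))).length = m := by simp
    rw [show m = ((List.range m).map (pvRowStep (pvBrow N k) (k + 1))).length from hlenmap.symm]
    simp only [List.set_append, List.length_map, List.length_range]
    rw [List.range_succ, List.map_append]
    simp

theorem pvA_fold (N : Nat) : ∀ k, k ≤ N →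
    (PySem.List.pyRange 1 ((k : Int) + 1) 1).foldl pvOuter (pvTable N 0) = pvTable N k := by
  intro k
  induction k with
  | zero =>
    intro _
    rw [PySem.List.pyRange_one_eq_nil (by omega), List.foldl_nil]
  | succ k ih =>
    intro hk
    have e : ((k + 1 : Nat) : Int) + 1 = (((k : Nat) : Int) + 1) + 1 := by push_cast; ring
    rw [e, PySem.List.pyRange_one_succ_right (by omega : (1:Int) ≤ (k:Int) + 1), List.foldl_append,
      List.foldl_cons, List.foldl_nil, ih (by omega)]
    rw [pvOuter]
    have e2 : ((k : Int) + 1) = ((k + 1 : Nat) : Int) := by push_cast; ring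
    have hinner := pvA_inner N k (by omega) (k + 1) (le_refl _)
    rw [← e2] at hinner
    rw [hinner, show N + 1 - (k + 1) = N - k from by omega, pvTable_succ N k]
    rfl

theorem pvAfold_eq (N : Nat) : pvAfold (N : Int) = pvTable N N := by
  rw [pvAfold, pvTable_zero]
  exact pvA_fold N N (le_refl _)

theorem pvTable_get_last (N : Nat) :
    PySem.List.pyGetD (pvTable N N) (N : Int) [] = pvBrow N N := by
  rw [PySem.List.pyGetD_natCast, List.getD_eq_getElem _ _ (by rw [pvTable_length]; omega)]
  simp [pvTable]

-- pvBrow rows carry exactly the pvCell values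
theorem pvBrow_cell (N : Nat) : ∀ i, i ≤ N → ∀ jn : Nat, jn ≤ N →
    (pvBrow N i).getD jn 0 = pvCell i (jn : Int) := by
  intro i
  induction i with
  | zero =>
    intro _ jn _
    simp [pvBrow, pvCell, List.getD]
  | succ i ih =>
    intro hi jn hjn
    by_cases hlt : jn < i + 1
    · have hrow : pvBrow N (i + 1)
          = (List.range (i + 1)).map (pvRowStep (pvBrow N i) (i + 1))
            ++ List.replicate (N - i) 0 := rfl
      rw [List.getD_eq_getElem _ _ (by rw [pvBrow_length N _ hi]; omega)]
      rw [List.getElem_of_eq hrow, List.getElem_append_left (by simp; omega),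
        List.getElem_map, List.getElem_range]
      rw [pvRowStep, pvCell]
      rw [if_neg (by omega : ¬ ((i : Int) + 1 ≤ (jn : Int)))]
      have habs : ((((jn : Int) - 1).natAbs : Nat) : Int) = |(jn : Int) - 1| :=
        (Int.abs_eq_natAbs _).symm
      have h1 : PySem.List.pyGetD (pvBrow N i) ((((jn : Int) - 1).natAbs : Nat) : Int) 0
          = pvCell i |(jn : Int) - 1| := by
        rw [PySem.List.pyGetD_natCast, ih (by omega) _ (by omega), habs]
      have h2 : (if jn + 2 ≤ i + 1 then PySem.List.pyGetD (pvBrow N i) ((jn : Int) + 1) 0 else 0)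
          = (if (jn : Int) + 1 ≤ (i : Int) then pvCell i ((jn : Int) + 1) else 0) := by
        by_cases hg : jn + 2 ≤ i + 1
        · rw [if_pos hg, if_pos (by omega)]
          rw [show ((jn : Int) + 1) = ((jn + 1 : Nat) : Int) from by push_cast; ring,
            PySem.List.pyGetD_natCast, ih (by omega) _ (by omega)]
        · rw [if_neg hg, if_neg (by omega)]
      rw [h1, h2]
    · rw [pvCell, if_pos (by omega : (i : Int) + 1 ≤ (jn : Int))]
      by_cases hle : jn ≤ N
      · have hrow : pvBrow N (i + 1)
            = (List.range (i + 1)).map (pvRowStep (pvBrow N i) (i + 1))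
              ++ List.replicate (N - i) 0 := rfl
        rw [List.getD_eq_getElem _ _ (by rw [pvBrow_length N _ hi]; omega)]
        rw [List.getElem_of_eq hrow, List.getElem_append_right (by simp; omega)]
        simp
      · omega

-- ---------- B-side pass 1: the needed-cell dicts ----------

-- one key expanded to its children (the body of the pass-1 inner loop, on the dict alone)
def pvChild (i : Int) (acc : PySem.Dict Int Bool) (kv : Int × Bool) : PySem.Dict Int Bool :=
  if 0 ≤ kv.1 ∧ kv.1 < i then
    let acc := acc.insert |kv.1 - 1| true
    if kv.1 + 1 ≤ i - 1 then acc.insert (kv.1 + 1) true else acc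
  else acc

def pvStepD (i : Int) (d : PySem.Dict Int Bool) : PySem.Dict Int Bool :=
  d.items.foldl (pvChild i) PySem.Dict.empty

-- the needed-cell dict at gap g below the top: level i = N - g
def pvND (N : Nat) (Y : Int) : Nat → PySem.Dict Int Bool
  | 0 => PySem.Dict.empty.insert Y true
  | g + 1 => pvStepD ((N : Int) - (g : Int)) (pvND N Y g)

-- the pass-1 list state once levels N..k+1 have been processed
def pvS (N : Nat) (Y : Int) (k : Nat) : List (PySem.Dict Int Bool) :=
  (List.range (N + 1)).map (fun m => if k ≤ m then pvND N Y (N - m) else PySem.Dict.empty)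

-- B's pass-1 bodies as named functions (defeq to the port)
def pvP1inner (i : Int) (need : List (PySem.Dict Int Bool)) (kv : Int × Bool) :
    List (PySem.Dict Int Bool) :=
  if 0 ≤ kv.1 ∧ kv.1 < i then
    let need := PySem.List.pySetD need (i - 1)
      ((PySem.List.pyGetD need (i - 1) PySem.Dict.empty).insert |kv.1 - 1| true)
    if kv.1 + 1 ≤ i - 1 then
      PySem.List.pySetD need (i - 1)
        ((PySem.List.pyGetD need (i - 1) PySem.Dict.empty).insert (kv.1 + 1) true)
    else need
  else need

def pvP1outer (need : List (PySem.Dict Int Bool)) (i : Int) : List (PySem.Dict Int Bool) :=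
  (PySem.List.pyGetD need i PySem.Dict.empty).items.foldl (pvP1inner i) need

-- the inner loop only rewrites slot i-1, by the dict-level fold
theorem pvP1inner_set (i : Int) (hi : 1 ≤ i) :
    ∀ (l : List (Int × Bool)) (S : List (PySem.Dict Int Bool)), (i - 1).toNat < S.length →
    l.foldl (pvP1inner i) S
      = S.set (i - 1).toNat (l.foldl (pvChild i) (S.getD (i - 1).toNat PySem.Dict.empty)) := by
  intro l
  induction l with
  | nil =>
    intro S hS
    rw [List.foldl_nil, List.foldl_nil, List.getD_eq_getElem _ _ hS, List.set_getElem_self]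
  | cons kv l ih =>
    intro S hS
    rw [List.foldl_cons, List.foldl_cons]
    by_cases hg : 0 ≤ kv.1 ∧ kv.1 < i
    · have h1 : (0 : Int) ≤ i - 1 := by omega
      rw [pvP1inner, if_pos hg, pvChild, if_pos hg]
      simp only [PySem.List.pySetD_of_nonneg _ _ h1, PySem.List.pyGetD_of_nonneg _ _ h1]
      by_cases hg2 : kv.1 + 1 ≤ i - 1
      · rw [if_pos hg2, if_pos hg2]
        rw [List.getD_eq_getElem _ _ hS,
          List.getD_eq_getElem _ _ (by rw [List.length_set]; exact hS),
          List.getElem_set_self (by rw [List.length_set]; exact hS), List.set_set,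
          ih _ (by rw [List.length_set]; exact hS), List.set_set,
          List.getD_eq_getElem _ _ (by rw [List.length_set]; exact hS),
          List.getElem_set_self (by rw [List.length_set]; exact hS)]
      · rw [if_neg hg2, if_neg hg2]
        rw [List.getD_eq_getElem _ _ hS, ih _ (by rw [List.length_set]; exact hS), List.set_set,
          List.getD_eq_getElem _ _ (by rw [List.length_set]; exact hS),
          List.getElem_set_self (by rw [List.length_set]; exact hS)]
    · rw [pvP1inner, if_neg hg, pvChild, if_neg hg]
      exact ih S hS

theorem pvS_length (N : Nat) (Y : Int) (k : Nat) : (pvS N Y k).length = N + 1 := by simp [pvS]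

theorem pvS_get (N : Nat) (Y : Int) (k m : Nat) (hm : m ≤ N) :
    (pvS N Y k).getD m PySem.Dict.empty
      = if k ≤ m then pvND N Y (N - m) else PySem.Dict.empty := by
  rw [List.getD_eq_getElem _ _ (by simp [pvS]; omega)]
  simp [pvS]

theorem pvS_set (N : Nat) (Y : Int) (k : Nat) (hk : k < N) :
    (pvS N Y (k + 1)).set k (pvND N Y (N - k)) = pvS N Y k := by
  apply List.ext_getElem
  · simp [pvS]
  intro m h1 h2
  simp only [pvS, List.length_map, List.length_range] at h2
  rw [List.getElem_set]
  simp only [pvS, List.getElem_map, List.getElem_range]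
  by_cases hkm : k = m
  · rw [if_pos hkm, ← hkm, if_pos (le_refl _)]
  · rw [if_neg hkm]
    by_cases hle : k + 1 ≤ m
    · rw [if_pos hle, if_pos (by omega)]
    · rw [if_neg hle, if_neg (by omega)]

theorem pvP1outer_step (N : Nat) (Y : Int) (k : Nat) (hk : k < N) :
    pvP1outer (pvS N Y (k + 1)) ((k : Int) + 1) = pvS N Y k := by
  rw [pvP1outer]
  have h1 : (0 : Int) ≤ (k : Int) + 1 := by omega
  rw [PySem.List.pyGetD_of_nonneg _ _ h1,
    show ((k : Int) + 1).toNat = k + 1 from by omega, pvS_get N Y (k + 1) (k + 1) (by omega),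
    if_pos (le_refl _)]
  rw [pvP1inner_set ((k : Int) + 1) (by omega) _ _
    (by rw [pvS_length]; omega : (((k : Int) + 1) - 1).toNat < (pvS N Y (k + 1)).length)]
  rw [show (((k : Int) + 1) - 1).toNat = k from by omega,
    pvS_get N Y (k + 1) k (by omega), if_neg (by omega)]
  have : (pvND N Y (N - (k + 1))).items.foldl (pvChild ((k : Int) + 1)) PySem.Dict.empty
      = pvND N Y (N - k) := by
    rw [show N - k = (N - (k + 1)) + 1 from by omega, pvND, pvStepD]
    congr 2
    omega
  rw [this, pvS_set N Y k hk]

theorem pvP1_fold (N : Nat) (Y : Int) : ∀ i k : Nat, k ≤ i → i ≤ N →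
    (PySem.List.pyRange (i : Int) (k : Int) (-1)).foldl pvP1outer (pvS N Y i) = pvS N Y k := by
  intro i
  induction i with
  | zero =>
    intro k hk _
    rw [PySem.List.pyRange_neg_one_eq_nil (by omega), List.foldl_nil,
      show k = 0 from by omega]
  | succ i ih =>
    intro k hk hiN
    by_cases hki : k = i + 1
    · rw [PySem.List.pyRange_neg_one_eq_nil (by omega), List.foldl_nil, hki]
    · rw [PySem.List.pyRange_neg_one_cons (by omega : (k : Int) < ((i + 1 : Nat) : Int)),
        List.foldl_cons]
      have e : ((i + 1 : Nat) : Int) = (i : Int) + 1 := by push_cast; ring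
      rw [e, pvP1outer_step N Y i (by omega),
        show (i : Int) + 1 - 1 = (i : Int) from by ring]
      exact ih k (by omega) (by omega)

-- the initial list (all empty, then need[X][Y] = True) is pvS N N
theorem pvP1_init (N : Nat) (Y : Int) :
    PySem.List.pySetD
      ((PySem.List.pyRange 0 ((N : Int) + 1) 1).map
        (fun _ => (PySem.Dict.empty : PySem.Dict Int Bool))) (N : Int)
      ((PySem.List.pyGetD
          ((PySem.List.pyRange 0 ((N : Int) + 1) 1).map
            (fun _ => (PySem.Dict.empty : PySem.Dict Int Bool))) (N : Int)
          PySem.Dict.empty).insert Y true)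
      = pvS N Y N := by
  have h1 : ((N : Int) + 1) = ((N + 1 : Nat) : Int) := by push_cast; ring
  rw [h1, PySem.List.pyRange_zero_natCast, List.map_map, PySem.List.pySetD_natCast,
    PySem.List.pyGetD_natCast]
  apply List.ext_getElem
  · simp [pvS]
  intro m h1 h2
  rw [List.getElem_set]
  simp only [List.getElem_map, List.getElem_range, Function.comp_apply]
  simp only [pvS, List.length_map, List.length_range] at h2
  simp only [pvS, List.getElem_map, List.getElem_range]
  by_cases hm : (N : Nat) = m
  · rw [if_pos hm, ← hm, if_pos (le_refl _), Nat.sub_self, pvND]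
    congr 1
    rw [List.getD_eq_getElem _ _ (by simp), List.getElem_map, List.getElem_range]
    rfl
  · rw [if_neg hm, if_neg (by omega)]

-- ---------- membership facts about the needed-cell dicts ----------

theorem pvChild_mono (i : Int) : ∀ (l : List (Int × Bool)) (acc : PySem.Dict Int Bool) (j : Int),
    j ∈ acc.keys → j ∈ (l.foldl (pvChild i) acc).keys := by
  intro l
  induction l with
  | nil => intro acc j hj; exact hj
  | cons kv l ih =>
    intro acc j hj
    rw [List.foldl_cons]
    apply ih
    rw [pvChild]
    split_ifs with h1 h2
    · rw [PySem.Dict.mem_keys_insert, PySem.Dict.mem_keys_insert]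
      right; right; exact hj
    · rw [PySem.Dict.mem_keys_insert]
      right; exact hj
    · exact hj

theorem pvChild_mem (i : Int) : ∀ (l : List (Int × Bool)) (acc : PySem.Dict Int Bool)
    (kv : Int × Bool), kv ∈ l → 0 ≤ kv.1 → kv.1 < i →
    |kv.1 - 1| ∈ (l.foldl (pvChild i) acc).keys ∧
      (kv.1 + 1 ≤ i - 1 → kv.1 + 1 ∈ (l.foldl (pvChild i) acc).keys) := by
  intro l
  induction l with
  | nil => intro acc kv hkv; exact absurd hkv (List.not_mem_nil)
  | cons a l ih =>
    intro acc kv hkv h0 h1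
    rw [List.foldl_cons]
    rcases List.mem_cons.mp hkv with heq | hmem
    · subst heq
      constructor
      · apply pvChild_mono
        rw [pvChild, if_pos ⟨h0, h1⟩]
        split_ifs with h2
        · rw [PySem.Dict.mem_keys_insert, PySem.Dict.mem_keys_insert]
          right; left; rfl
        · rw [PySem.Dict.mem_keys_insert]
          left; rfl
      · intro h2
        apply pvChild_mono
        rw [pvChild, if_pos ⟨h0, h1⟩, if_pos h2, PySem.Dict.mem_keys_insert]
        left; rfl
    · exact ih _ kv hmem h0 h1

theorem pvChild_subset (i : Int) : ∀ (l : List (Int × Bool)) (acc : PySem.Dict Int Bool) (j : Int),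
    j ∈ (l.foldl (pvChild i) acc).keys →
    j ∈ acc.keys ∨ ∃ kv, kv ∈ l ∧ 0 ≤ kv.1 ∧ kv.1 < i ∧ (j = |kv.1 - 1| ∨ j = kv.1 + 1) := by
  intro l
  induction l with
  | nil => intro acc j hj; exact Or.inl hj
  | cons a l ih =>
    intro acc j hj
    rw [List.foldl_cons] at hj
    rcases ih _ j hj with hacc | ⟨kv, hkv, hb⟩
    · rw [pvChild] at hacc
      split_ifs at hacc with h1 h2
      · rw [PySem.Dict.mem_keys_insert, PySem.Dict.mem_keys_insert] at hacc
        rcases hacc with h | h | h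
        · exact Or.inr ⟨a, List.mem_cons_self, h1.1, h1.2, Or.inr h⟩
        · exact Or.inr ⟨a, List.mem_cons_self, h1.1, h1.2, Or.inl h⟩
        · exact Or.inl h
      · rw [PySem.Dict.mem_keys_insert] at hacc
        rcases hacc with h | h
        · exact Or.inr ⟨a, List.mem_cons_self, h1.1, h1.2, Or.inl h⟩
        · exact Or.inl h
      · exact Or.inl hacc
    · exact Or.inr ⟨kv, List.mem_cons_of_mem _ hkv, hb⟩

theorem pvND_bound (N : Nat) (Y : Int) (h0 : 0 ≤ Y) (h1 : Y ≤ (N : Int)) :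
    ∀ g, g ≤ N → ∀ j, j ∈ (pvND N Y g).keys → 0 ≤ j ∧ j ≤ (N : Int) := by
  intro g
  induction g with
  | zero =>
    intro _ j hj
    rw [pvND, PySem.Dict.mem_keys_insert] at hj
    rcases hj with h | h
    · subst h; exact ⟨h0, h1⟩
    · rw [PySem.Dict.keys_empty] at h
      exact absurd h (List.not_mem_nil)
  | succ g ih =>
    intro hg j hj
    rw [pvND, pvStepD] at hj
    rcases pvChild_subset _ _ _ _ hj with h | ⟨kv, hkv, hb0, hb1, hj2⟩
    · rw [PySem.Dict.keys_empty] at h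
      exact absurd h (List.not_mem_nil)
    · have hk := ih (by omega) kv.1 (PySem.Dict.mem_keys_of_mem_items _ hkv)
      rcases hj2 with rfl | rfl
      · rcases abs_cases (kv.1 - 1) with ⟨he, _⟩ | ⟨he, _⟩ <;> omega
      · omega

theorem pvND_closed (N : Nat) (Y : Int) (g : Nat) (hg : g < N) :
    ∀ j, j ∈ (pvND N Y g).keys → 0 ≤ j → j < (N : Int) - (g : Int) →
    |j - 1| ∈ (pvND N Y (g + 1)).keys ∧
      (j + 1 ≤ (N : Int) - (g : Int) - 1 → j + 1 ∈ (pvND N Y (g + 1)).keys) := by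
  intro j hj h0 h1
  rw [pvND, pvStepD]
  have : ∃ b, (j, b) ∈ (pvND N Y g).items := by
    rcases List.mem_map.mp hj with ⟨p, hp, hfst⟩
    exact ⟨p.2, by rw [← hfst]; exact hp⟩
  obtain ⟨b, hb⟩ := this
  exact pvChild_mem ((N : Int) - (g : Int)) _ PySem.Dict.empty (j, b) hb h0 h1

-- ---------- B-side pass 2: evaluating the needed cells ----------

-- the value pass 2 writes for key j at level i, reading the dict of level i-1
def pvValF (i : Int) (prev : PySem.Dict Int Int) (j : Int) : Int :=
  if i = 0 ∨ i ≤ j then 0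
  else PySem.Int.mod ((prev.getD |j - 1| 0
      + if j + 1 ≤ i - 1 then prev.getD (j + 1) 0 else 0) * 500000004 + 1) 1000000007

-- the per-level value dicts
def pvVal (N : Nat) (Y : Int) : Nat → PySem.Dict Int Int
  | 0 => (pvND N Y N).items.foldl
      (fun cur kv => cur.insert kv.1 (pvValF 0 PySem.Dict.empty kv.1)) PySem.Dict.empty
  | i + 1 => (pvND N Y (N - (i + 1))).items.foldl
      (fun cur kv => cur.insert kv.1 (pvValF ((i : Int) + 1) (pvVal N Y i) kv.1)) PySem.Dict.empty

-- B's pass-2 body as a named function (defeq to the port, with inv2 evaluated)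
def pvP2outer (F : List (PySem.Dict Int Bool)) (prev : PySem.Dict Int Int) (i : Int) :
    PySem.Dict Int Int :=
  (PySem.List.pyGetD F i PySem.Dict.empty).items.foldl (fun cur kv =>
    if i = 0 ∨ i ≤ kv.1 then cur.insert kv.1 0
    else
      let v := prev.getD |kv.1 - 1| 0
      let v := if kv.1 + 1 ≤ i - 1 then v + prev.getD (kv.1 + 1) 0 else v
      cur.insert kv.1 (PySem.Int.mod (v * PySem.Int.floordiv (1000000007 + 1) 2 + 1) 1000000007))
    PySem.Dict.empty

theorem pvP2body_eq (i : Int) (prev : PySem.Dict Int Int) :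
    (fun (cur : PySem.Dict Int Int) (kv : Int × Bool) =>
      if i = 0 ∨ i ≤ kv.1 then cur.insert kv.1 0
      else
        let v := prev.getD |kv.1 - 1| 0
        let v := if kv.1 + 1 ≤ i - 1 then v + prev.getD (kv.1 + 1) 0 else v
        cur.insert kv.1 (PySem.Int.mod (v * PySem.Int.floordiv (1000000007 + 1) 2 + 1) 1000000007))
    = fun cur kv => cur.insert kv.1 (pvValF i prev kv.1) := by
  funext cur kv
  rw [pvHalf, pvValF]
  split_ifs with h1 h2
  · rfl
  · rfl
  · rw [add_zero]

-- a dict built by inserting F(key) for every item key: lookup is F on the key set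
theorem pvBuild_get? (F : Int → Int) : ∀ (l : List (Int × Bool)) (acc : PySem.Dict Int Int)
    (j : Int),
    (l.foldl (fun cur kv => cur.insert kv.1 (F kv.1)) acc).get? j
      = if j ∈ l.map (·.1) then some (F j) else acc.get? j := by
  intro l
  induction l with
  | nil => intro acc j; simp
  | cons a l ih =>
    intro acc j
    rw [List.foldl_cons, ih]
    by_cases hl : j ∈ l.map (·.1)
    · rw [if_pos hl, if_pos (by simp [hl])]
    · by_cases hja : j = a.1
      · subst hja
        rw [if_neg hl, if_pos (by simp), PySem.Dict.get?_insert, if_pos rfl]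
      · rw [if_neg hl, if_neg (by simp [hja, hl]), PySem.Dict.get?_insert, if_neg hja]

-- the level-i value dict returns pvCell on every needed key
theorem pvVal_get? (N : Nat) (Y : Int) (h0 : 0 ≤ Y) (h1 : Y ≤ (N : Int)) :
    ∀ i, i ≤ N → ∀ j, j ∈ (pvND N Y (N - i)).keys →
    (pvVal N Y i).get? j = some (pvCell i j) := by
  intro i
  induction i with
  | zero =>
    intro _ j hj
    rw [pvVal, pvBuild_get? _ _ _ j, if_pos (by exact hj), pvValF, if_pos (Or.inl rfl), pvCell]
  | succ i ih =>
    intro hi j hj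
    rw [pvVal, pvBuild_get? _ _ _ j, if_pos (by exact hj)]
    congr 1
    have hbound := pvND_bound N Y h0 h1 (N - (i + 1)) (by omega) j hj
    rw [pvValF, pvCell]
    by_cases hge : ((i : Int) + 1) ≤ j
    · rw [if_pos (Or.inr hge), if_pos hge]
    · rw [if_neg (by push_neg; exact ⟨by omega, by omega⟩), if_neg hge]
      have hclosed := pvND_closed N Y (N - (i + 1)) (by omega) j hj hbound.1
        (by rw [show (N : Int) - ((N - (i + 1) : Nat) : Int) = (i : Int) + 1 from by omega]; omega)
      rw [show (N : Int) - ((N - (i + 1) : Nat) : Int) - 1 = (i : Int) + 1 - 1 from by omega,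
        show (N - (i + 1)) + 1 = N - i from by omega] at hclosed
      have hA : (pvVal N Y i).getD |j - 1| 0 = pvCell i |j - 1| := by
        rw [PySem.Dict.getD_eq_get?_getD, ih (by omega) _ hclosed.1]
        rfl
      have hB : (if j + 1 ≤ (i : Int) + 1 - 1 then (pvVal N Y i).getD (j + 1) 0 else 0)
          = (if j + 1 ≤ (i : Int) then pvCell i (j + 1) else 0) := by
        by_cases hg : j + 1 ≤ (i : Int)
        · rw [if_pos (by omega), if_pos hg, PySem.Dict.getD_eq_get?_getD,
            ih (by omega) _ (hclosed.2 (by omega))]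
          rfl
        · rw [if_neg (by omega), if_neg hg]
      rw [hA, hB]

-- the pass-2 fold over levels 0..k produces the level-k value dict
theorem pvP2_fold (N : Nat) (Y : Int) (h0 : 0 ≤ Y) (h1 : Y ≤ (N : Int)) :
    ∀ k, k ≤ N →
    (PySem.List.pyRange 0 ((k : Int) + 1) 1).foldl (pvP2outer (pvS N Y 0)) PySem.Dict.empty
      = pvVal N Y k := by
  intro k
  induction k with
  | zero =>
    intro _
    rw [show ((0 : Nat) : Int) + 1 = 0 + 1 from by norm_num, PySem.List.pyRange_one_singleton,
      List.foldl_cons, List.foldl_nil, pvP2outer,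
      PySem.List.pyGetD_of_nonneg _ _ (le_refl 0), show (0 : Int).toNat = 0 from rfl,
      pvS_get N Y 0 0 (by omega), if_pos (le_refl _), pvP2body_eq, pvVal, Nat.sub_zero]
  | succ k ih =>
    intro hk
    have e : ((k + 1 : Nat) : Int) + 1 = (((k : Nat) : Int) + 1) + 1 := by push_cast; ring
    rw [e, PySem.List.pyRange_one_succ_right (by omega : (0:Int) ≤ (k:Int) + 1),
      List.foldl_append, List.foldl_cons, List.foldl_nil, ih (by omega), pvP2outer,
      PySem.List.pyGetD_of_nonneg _ _ (by omega : (0:Int) ≤ (k:Int) + 1),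
      show ((k : Int) + 1).toNat = k + 1 from by omega,
      pvS_get N Y 0 (k + 1) (by omega), if_pos (by omega), pvP2body_eq, pvVal]

-- Y is a key of the top-level needed dict
theorem pvND_top_mem (N : Nat) (Y : Int) : Y ∈ (pvND N Y (N - N)).keys := by
  rw [Nat.sub_self, pvND, PySem.Dict.mem_keys_insert]
  left; rfl

-- ===== VERDICT (by name: the statement is the Claim_ definition above) =====
theorem solve_spec : Claim_equal_solve := by
  unfold Claim_equal_solve
  intro n x y _ hpre
  obtain ⟨hX, hY0, hYX⟩ := hpre
  unfold Spec_solve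
  have hA : solve n x y
      = PySem.List.pyGetD (PySem.List.pyGetD (pvAfold (n - x)) (n - x) []) (n - y) 0 := rfl
  have hB : solve_alt n x y
      = ((PySem.List.pyRange 0 ((n - x) + 1) 1).foldl
          (pvP2outer ((PySem.List.pyRange (n - x) 0 (-1)).foldl pvP1outer
            (PySem.List.pySetD
              ((PySem.List.pyRange 0 ((n - x) + 1) 1).map
                (fun _ => (PySem.Dict.empty : PySem.Dict Int Bool))) (n - x)
              ((PySem.List.pyGetD
                  ((PySem.List.pyRange 0 ((n - x) + 1) 1).map
                    (fun _ => (PySem.Dict.empty : PySem.Dict Int Bool))) (n - x)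
                  PySem.Dict.empty).insert (n - y) true))))
          PySem.Dict.empty).getD (n - y) 0 := rfl
  obtain ⟨N, hN⟩ : ∃ N : Nat, n - x = (N : Int) := ⟨(n - x).toNat, (Int.toNat_of_nonneg hX).symm⟩
  set Y : Int := n - y with hYdef
  rw [hN] at hA hB hYX
  -- A's side: the table cell is pvCell N Y
  have hAval : solve n x y = pvCell N Y := by
    rw [hA, pvAfold_eq N, pvTable_get_last N, PySem.List.pyGetD_of_nonneg _ _ hY0,
      pvBrow_cell N N (le_refl _) Y.toNat (by omega), Int.toNat_of_nonneg hY0]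
  -- B's side: the sparse evaluation returns pvCell N Y as well
  have hBval : solve_alt n x y = pvCell N Y := by
    have hfold := pvP1_fold N Y N 0 (by omega) (le_refl _)
    rw [Nat.cast_zero] at hfold
    rw [hB, pvP1_init N Y, hfold]
    rw [pvP2_fold N Y hY0 hYX N (le_refl _)]
    rw [PySem.Dict.getD_eq_get?_getD, pvVal_get? N Y hY0 hYX N (le_refl _) Y (pvND_top_mem N Y)]
    rfl
  rw [hAval, hBval]
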